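-- pv_equiv track=rewrite | github.com/IanTurtle/AoC-22 | 09/task2.py | update_position
-- ===== SOURCE A (Python) =====
-- def update_position(position, step):
-- 	dir = step[0]
-- 	amount = step[1]
--
-- 	match dir:
-- 		case 'R':
-- 			new_positions = [[position[0] + i, position[1]] for i in range(1, amount+1)]
-- 		case 'U':
-- 			new_positions = [[position[0], position[1] + i] for i in range(1, amount+1)]
-- 		case 'L':
-- 			new_positions = [[position[0]-i, position[1]] for i in range(1, amount+1)]
-- 		case 'D':
-- 			new_positions = [[position[0], position[1] - i] for i in range(1, amount+1)]
-- 	return new_positions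
-- ===== SOURCE B (Python) =====
-- DELTAS = {'R': (1, 0), 'U': (0, 1), 'L': (-1, 0), 'D': (0, -1)}
--
--
-- def _walk(dx, dy, x, y, n):
--     """Take n unit steps of (dx, dy) starting from (x, y), recording each point reached."""
--     if n < 1:
--         return []
--     x, y = x + dx, y + dy
--     return [[x, y]] + _walk(dx, dy, x, y, n - 1)
--
--
-- def update_position(position, step):
--     dx, dy = DELTAS[step[0]]
--     if step[1] < 1:
--         return []
--     return _walk(dx, dy, position[0], position[1], step[1])
-- ===== Notes on version B (the rewrite author's own statement) =====
-- stated objective: alternative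
-- what changed: Replaces A's four independent comprehensions (each position computed from the start point by an offset i) with a recursive walk that maintains a running point and advances it one unit step at a time, consing the positions it passes through.
import Mathlib
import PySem

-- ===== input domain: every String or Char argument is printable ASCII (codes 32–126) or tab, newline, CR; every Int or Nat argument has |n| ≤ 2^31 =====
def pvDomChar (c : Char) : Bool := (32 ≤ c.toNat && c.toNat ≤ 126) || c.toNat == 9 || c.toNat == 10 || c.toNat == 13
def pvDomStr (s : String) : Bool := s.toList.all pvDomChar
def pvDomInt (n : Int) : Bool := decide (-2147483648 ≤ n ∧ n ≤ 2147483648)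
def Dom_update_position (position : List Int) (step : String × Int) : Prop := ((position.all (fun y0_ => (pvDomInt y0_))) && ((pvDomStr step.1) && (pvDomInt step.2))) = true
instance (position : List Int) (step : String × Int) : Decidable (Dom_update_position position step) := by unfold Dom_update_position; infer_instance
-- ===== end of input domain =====

-- B replaces A's four independent offset comprehensions by a recursive walk that keeps a
-- running point and advances it one unit step at a time; objective: alternative decomposition.

-- ===== PORT A =====
-- A's match on the direction string; the branch bodies are A's four comprehensions.
-- position[k] is ported as PySem.List.pyGetD (in range under Pre_); an unmatched direction
-- (UnboundLocalError in Python) is outside Pre_ and the port returns [] there.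
def update_position (position : List Int) (step : String × Int) : List (List Int) :=
  let dir := step.1
  let amount := step.2
  if dir = "R" then
    (PySem.List.pyRange 1 (amount + 1) 1).map
      (fun i => [PySem.List.pyGetD position 0 0 + i, PySem.List.pyGetD position 1 0])
  else if dir = "U" then
    (PySem.List.pyRange 1 (amount + 1) 1).map
      (fun i => [PySem.List.pyGetD position 0 0, PySem.List.pyGetD position 1 0 + i])
  else if dir = "L" then
    (PySem.List.pyRange 1 (amount + 1) 1).map
      (fun i => [PySem.List.pyGetD position 0 0 - i, PySem.List.pyGetD position 1 0])
  else if dir = "D" then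
    (PySem.List.pyRange 1 (amount + 1) 1).map
      (fun i => [PySem.List.pyGetD position 0 0, PySem.List.pyGetD position 1 0 - i])
  else []

-- ===== PORT B =====
-- B's recursive walk: a running point advanced one unit step at a time, consing each point.
def pvWalk (dx dy x y n : Int) : List (List Int) :=
  if h : n < 1 then []
  else [x + dx, y + dy] :: pvWalk dx dy (x + dx) (y + dy) (n - 1)
termination_by n.toNat
decreasing_by omega

-- B's delta table; a missing key (KeyError in Python) is outside Pre_, getD's default is arbitrary.
def update_position_alt (position : List Int) (step : String × Int) : List (List Int) :=
  let deltas : PySem.Dict String (Int × Int) :=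
    PySem.Dict.ofList [("R", (1, 0)), ("U", (0, 1)), ("L", (-1, 0)), ("D", (0, -1))]
  let d := deltas.getD step.1 (0, 0)
  if step.2 < 1 then []
  else pvWalk d.1 d.2 (PySem.List.pyGetD position 0 0) (PySem.List.pyGetD position 1 0) step.2

-- ===== PRECONDITION & SPEC =====
-- Pre_ excludes exactly the inputs where Python A raises: an unrecognized direction
-- (UnboundLocalError) and, when at least one step is taken, a position with fewer than
-- two coordinates (IndexError).
def Pre_update_position (position : List Int) (step : String × Int) : Prop :=
  (step.1 = "R" ∨ step.1 = "U" ∨ step.1 = "L" ∨ step.1 = "D") ∧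
  (1 ≤ step.2 → 2 ≤ position.length)
instance (position : List Int) (step : String × Int) : Decidable (Pre_update_position position step) := by unfold Pre_update_position; infer_instance
def pvWitness_update_position : List Int × (String × Int) := ([3, -2], ("U", 2))

def Spec_update_position (position : List Int) (step : String × Int) (out : List (List Int)) : Prop := out = update_position_alt position step
instance (position : List Int) (step : String × Int) (out : List (List Int)) : Decidable (Spec_update_position position step out) := by unfold Spec_update_position; infer_instance

-- ===== CLAIM (what is proved, stated in full; the proofs are below) =====
def Claim_equal_update_position : Prop := ∀ (position : List Int) (step : String × Int), Dom_update_position position step → Pre_update_position position step → Spec_update_position position step (update_position position step)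

-- ===== LEMMAS AND PROOFS =====

-- The walk, characterised as offsets from the start point.
theorem pvWalk_eq (dx dy : Int) : ∀ (m : Nat) (x y : Int),
    pvWalk dx dy x y (m : Int) =
      (List.range m).map (fun (k : Nat) => [x + ((k : Int) + 1) * dx, y + ((k : Int) + 1) * dy]) := by
  intro m
  induction m with
  | zero =>
    intro x y
    unfold pvWalk
    rw [dif_pos (by norm_num)]
    simp
  | succ m ih =>
    intro x y
    unfold pvWalk
    rw [dif_neg (by omega)]
    have h1 : ((m : Int) + 1) - 1 = (m : Int) := by ring
    push_cast
    rw [h1, ih (x + dx) (y + dy), List.range_succ_eq_map]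
    simp only [List.map_cons, List.map_map, List.cons.injEq]
    refine ⟨by norm_num, ?_⟩
    apply List.map_congr_left
    intro k _
    simp only [Function.comp_apply, List.cons.injEq, and_true]
    push_cast
    constructor <;> ring

-- A's branch comprehension equals B's walk, for any branch body f of the offset form.
theorem pvBranch_eq (x y dx dy amount : Int) (hlt : ¬ amount < 1)
    (f : Int → List Int) (hf : ∀ i, f i = [x + i * dx, y + i * dy]) :
    (PySem.List.pyRange 1 (amount + 1) 1).map f = pvWalk dx dy x y amount := by
  obtain ⟨m, rfl⟩ : ∃ m : Nat, amount = (m : Int) := ⟨amount.toNat, by omega⟩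
  rw [pvWalk_eq, PySem.List.pyRange_one]
  have h1 : ((m : Int) + 1 - 1).toNat = m := by omega
  rw [h1, List.map_map]
  apply List.map_congr_left
  intro k _
  simp only [Function.comp_apply, hf, List.cons.injEq, and_true]
  constructor <;> ring

-- ===== VERDICT (by name: the statement is the Claim_ definition above) =====
theorem update_position_spec : Claim_equal_update_position := by
  intro position step _ hpre
  obtain ⟨hdir, -⟩ := hpre
  rcases step with ⟨dir, amount⟩
  unfold Spec_update_position update_position update_position_alt
  rcases hdir with h | h | h | h <;> subst h <;> simp only [reduceIte] <;>
    by_cases hlt : amount < 1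
  · simp [if_pos hlt, PySem.List.pyRange_one_eq_nil (by omega : amount + 1 ≤ 1)]
  · rw [if_neg hlt]
    exact pvBranch_eq _ _ 1 0 amount hlt _ (fun i => by simp only [mul_one, mul_zero, add_zero])
  · simp [if_pos hlt, PySem.List.pyRange_one_eq_nil (by omega : amount + 1 ≤ 1)]
  · rw [if_neg hlt]
    exact pvBranch_eq _ _ 0 1 amount hlt _ (fun i => by simp only [mul_one, mul_zero, add_zero])
  · simp [if_pos hlt, PySem.List.pyRange_one_eq_nil (by omega : amount + 1 ≤ 1)]
  · rw [if_neg hlt]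
    exact pvBranch_eq _ _ (-1) 0 amount hlt _
      (fun i => by simp only [mul_neg_one, mul_zero, add_zero, sub_eq_add_neg])
  · simp [if_pos hlt, PySem.List.pyRange_one_eq_nil (by omega : amount + 1 ≤ 1)]
  · rw [if_neg hlt]
    exact pvBranch_eq _ _ 0 (-1) amount hlt _
      (fun i => by simp only [mul_neg_one, mul_zero, add_zero, sub_eq_add_neg])
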